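-- pv_equiv track=rewrite | github.com/Vitaliy-cyber/yoga-platform | backend/services/csv_security.py | sanitize_csv_field
-- ===== SOURCE A (Python) =====
-- import unicodedata
-- from typing import Optional
--
-- CSV_INJECTION_CHARS = ("=", "+", "-", "@")
--
-- def sanitize_csv_field(value: Optional[str]) -> str:
--     """
--     Sanitize a CSV field to prevent formula injection.
--
--     Values that start with formula triggers are prefixed with an apostrophe.
--     """
--     if value is None:
--         return ""
--
--     normalized = "".join(
--         " "
--         if unicodedata.category(ch) in ("Cc", "Zl", "Zp")
--         else ch
--         for ch in str(value)
--     )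
--
--     idx = 0
--     while idx < len(normalized):
--         ch = normalized[idx]
--         if ch.isspace() or unicodedata.category(ch) == "Cf":
--             idx += 1
--             continue
--         break
--
--     if idx < len(normalized):
--         first = normalized[idx]
--         if first in CSV_INJECTION_CHARS:
--             return "'" + normalized
--         if first == "'":
--             j = idx + 1
--             while j < len(normalized):
--                 ch = normalized[j]
--                 if ch.isspace() or unicodedata.category(ch) == "Cf":
--                     j += 1
--                     continue
--                 break
--             if j < len(normalized) and normalized[j] in CSV_INJECTION_CHARS:
--                 return "'" + normalized
--
--     return normalized
-- ===== SOURCE B (Python) =====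
-- import unicodedata
-- from typing import Optional
--
-- CSV_INJECTION_CHARS = ("=", "+", "-", "@")
--
-- def sanitize_csv_field(value: Optional[str]) -> str:
--     """Prefix a CSV field with an apostrophe if it would trigger a formula."""
--     if value is None:
--         return ""
--
--     normalized = "".join(
--         " " if unicodedata.category(ch) in ("Cc", "Zl", "Zp") else ch
--         for ch in str(value)
--     )
--
--     # one pass: the ordered significant (non-space, non-Cf) characters
--     sig = [ch for ch in normalized
--            if not (ch.isspace() or unicodedata.category(ch) == "Cf")]
--
--     if sig and (sig[0] in CSV_INJECTION_CHARS
--                 or (sig[0] == "'" and len(sig) > 1 and sig[1] in CSV_INJECTION_CHARS)):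
--         return "'" + normalized
--     return normalized
-- ===== Notes on version B (the rewrite author's own statement) =====
-- stated objective: simpler
-- what changed: Replaces A's two explicit index-pointer while-loops (skip-then-peek, done twice) with a single filtered list of significant characters and one boolean decision over its first two elements.
import Mathlib
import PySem

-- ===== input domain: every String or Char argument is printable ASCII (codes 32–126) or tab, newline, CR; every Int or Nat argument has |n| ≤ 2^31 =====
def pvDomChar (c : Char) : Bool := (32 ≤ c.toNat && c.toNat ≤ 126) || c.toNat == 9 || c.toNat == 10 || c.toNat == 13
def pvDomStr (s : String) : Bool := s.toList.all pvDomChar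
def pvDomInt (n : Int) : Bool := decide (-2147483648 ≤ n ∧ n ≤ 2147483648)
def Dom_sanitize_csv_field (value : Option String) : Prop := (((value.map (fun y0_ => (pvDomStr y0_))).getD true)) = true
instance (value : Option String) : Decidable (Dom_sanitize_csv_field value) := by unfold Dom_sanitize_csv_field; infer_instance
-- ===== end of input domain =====

-- B replaces A's two index-pointer skip loops by one filtered list of significant
-- characters and a single decision over its first two elements (objective: simpler).

-- ===== PORT A =====
def csvInjectionChars : List Char := ['=', '+', '-', '@']

-- unicodedata.category(ch) in ("Cc","Zl","Zp") — exact on the ASCII domain: Cc ⟺ code < 32 (or 127); Zl/Zp do not occur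
def isCcZlZp (c : Char) : Bool := c.toNat < 32 || c.toNat == 127

-- ch.isspace() or unicodedata.category(ch) == "Cf" — exact on the ASCII domain: no Cf characters there
def isSkipChar (c : Char) : Bool := PySem.Chars.isspace c

-- A's 'while idx < len: if skip: idx += 1; continue; break' — the suffix starting at the final idx
def skipWsCf : List Char → List Char
  | [] => []
  | c :: rest => if isSkipChar c then skipWsCf rest else c :: rest

def sanitize_csv_field (value : Option String) : String :=
  match value with
  | none => ""
  | some v =>
    let normalized := v.toList.map (fun ch => if isCcZlZp ch then ' ' else ch)
    match skipWsCf normalized with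
    | [] => String.ofList normalized
    | first :: rest =>
      if first ∈ csvInjectionChars then String.ofList ('\'' :: normalized)
      else if first = '\'' then
        match skipWsCf rest with
        | [] => String.ofList normalized
        | second :: _ =>
          if second ∈ csvInjectionChars then String.ofList ('\'' :: normalized)
          else String.ofList normalized
      else String.ofList normalized

-- ===== PORT B =====
def sanitize_csv_field_alt (value : Option String) : String :=
  match value with
  | none => ""
  | some v =>
    let normalized := v.toList.map (fun ch => if isCcZlZp ch then ' ' else ch)
    let sig := normalized.filter (fun c => !isSkipChar c)
    let inject :=
      match sig with
      | [] => false
      | a :: tail =>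
        a ∈ csvInjectionChars ||
          (a = '\'' && match tail with
                       | [] => false
                       | b :: _ => decide (b ∈ csvInjectionChars))
    if inject then String.ofList ('\'' :: normalized) else String.ofList normalized

-- ===== PRECONDITION & SPEC =====
def Spec_sanitize_csv_field (value : Option String) (out : String) : Prop := out = sanitize_csv_field_alt value
instance (value : Option String) (out : String) : Decidable (Spec_sanitize_csv_field value out) := by unfold Spec_sanitize_csv_field; infer_instance

-- ===== CLAIM (what is proved, stated in full; the proofs are below) =====
def Claim_equal_sanitize_csv_field : Prop := ∀ (value : Option String), Dom_sanitize_csv_field value → Spec_sanitize_csv_field value (sanitize_csv_field value)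

-- ===== LEMMAS AND PROOFS =====

theorem filter_eq_skip (cs : List Char) :
    cs.filter (fun c => !isSkipChar c) =
      match skipWsCf cs with
      | [] => []
      | c :: rest => c :: rest.filter (fun c => !isSkipChar c) := by
  induction cs with
  | nil => simp [skipWsCf]
  | cons c rest ih =>
    by_cases h : isSkipChar c = true
    · simpa [skipWsCf, List.filter, h] using ih
    · simp [skipWsCf, List.filter, h]

-- ===== VERDICT (by name: the statement is the Claim_ definition above) =====
theorem sanitize_csv_field_spec : Claim_equal_sanitize_csv_field := by
  intro value _
  unfold Spec_sanitize_csv_field sanitize_csv_field sanitize_csv_field_alt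
  match value with
  | none => rfl
  | some v =>
    simp only
    set normalized := v.toList.map (fun ch => if isCcZlZp ch then ' ' else ch) with hn
    have hfil := filter_eq_skip normalized
    rcases h1 : skipWsCf normalized with _ | ⟨first, rest⟩
    · rw [h1] at hfil; simp [hfil]
    · rw [h1] at hfil
      have hfil2 := filter_eq_skip rest
      by_cases hf : first ∈ csvInjectionChars
      · simp [hfil, hf]
      · by_cases hq : first = '\''
        · rcases h2 : skipWsCf rest with _ | ⟨second, tail⟩
          · rw [h2] at hfil2; simp [hfil, hfil2, hq, h2, csvInjectionChars]
          · rw [h2] at hfil2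
            by_cases hs : second ∈ csvInjectionChars
            · simp [hfil, hfil2, hq, h2, csvInjectionChars]
            · simp [hfil, hfil2, hq, h2, csvInjectionChars]
        · simp [hfil, hf, hq]
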